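-- pv_equiv track=rewrite | github.com/kairos-agi/kairos-sensenova | kairos/modules/utils/tp_utils.py | build_tp_chunk_list
-- ===== SOURCE A (Python) =====
-- from typing import List, Optional
--
-- def build_tp_chunk_list(num_heads: int, tp_size: int) -> List[int]:
--     if tp_size <= 0:
--         raise RuntimeError(f"tp_size must be > 0, got {tp_size}")
--     if num_heads <= 0:
--         raise RuntimeError(f"num_heads must be > 0, got {num_heads}")
--
--     base = num_heads // tp_size
--     rem = num_heads % tp_size
--     return [base + (1 if r < rem else 0) for r in range(tp_size)]
-- ===== SOURCE B (Python) =====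
-- def build_tp_chunk_list(num_heads, tp_size):
--     if tp_size <= 0:
--         raise RuntimeError(f"tp_size must be > 0, got {tp_size}")
--     if num_heads <= 0:
--         raise RuntimeError(f"num_heads must be > 0, got {num_heads}")
--     chunks = []
--     remaining = num_heads
--     slots = tp_size
--     while slots > 0:
--         c = -(-remaining // slots)  # ceil division of what is left over the remaining slots
--         chunks.append(c)
--         remaining -= c
--         slots -= 1
--     return chunks
-- ===== Notes on version B (the rewrite author's own statement) =====
-- stated objective: alternative
-- what changed: Replaces the divmod-plus-conditional comprehension with a greedy loop that never computes base/rem: each step takes the ceiling of remaining_heads / remaining_slots, appends it, and subtracts it from the remaining heads.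
import Mathlib
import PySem

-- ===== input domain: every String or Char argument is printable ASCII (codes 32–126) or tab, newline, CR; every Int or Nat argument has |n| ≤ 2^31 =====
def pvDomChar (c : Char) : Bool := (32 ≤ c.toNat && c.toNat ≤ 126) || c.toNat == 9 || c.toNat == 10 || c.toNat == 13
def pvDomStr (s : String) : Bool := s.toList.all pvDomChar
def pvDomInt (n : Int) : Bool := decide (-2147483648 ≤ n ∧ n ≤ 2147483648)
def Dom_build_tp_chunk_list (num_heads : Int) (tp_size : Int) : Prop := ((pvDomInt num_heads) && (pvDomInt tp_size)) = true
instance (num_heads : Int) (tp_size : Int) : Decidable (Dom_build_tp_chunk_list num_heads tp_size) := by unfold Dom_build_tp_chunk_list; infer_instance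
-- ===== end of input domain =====

-- B replaces the divmod-plus-conditional comprehension with a greedy loop: each step takes the ceiling of remaining/slots, appends it and subtracts it; same O(tp_size) cost, different algorithm.
-- ===== PORT A =====
def build_tp_chunk_list (num_heads : Int) (tp_size : Int) : List Int :=
  let base := PySem.Int.floordiv num_heads tp_size
  let rem := PySem.Int.mod num_heads tp_size
  (PySem.List.pyRange 0 tp_size 1).map (fun r => base + (if r < rem then 1 else 0))

-- ===== PORT B =====
-- while loop on 'slots', fueled by slots (it decreases by exactly 1 each iteration)
def build_tp_chunk_list_go (remaining : Int) : Nat → List Int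
  | 0 => []
  | s + 1 =>
      let slots : Int := (s : Int) + 1
      let c := -(PySem.Int.floordiv (-remaining) slots)
      c :: build_tp_chunk_list_go (remaining - c) s

def build_tp_chunk_list_alt (num_heads : Int) (tp_size : Int) : List Int :=
  build_tp_chunk_list_go num_heads tp_size.toNat

-- ===== PRECONDITION & SPEC =====
-- Pre_ excludes exactly the inputs where A raises RuntimeError (tp_size <= 0 or num_heads <= 0)
def Pre_build_tp_chunk_list (num_heads : Int) (tp_size : Int) : Prop := 0 < num_heads ∧ 0 < tp_size
instance (num_heads : Int) (tp_size : Int) : Decidable (Pre_build_tp_chunk_list num_heads tp_size) := by unfold Pre_build_tp_chunk_list; infer_instance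
def pvWitness_build_tp_chunk_list : Int × Int := (7, 3)

def Spec_build_tp_chunk_list (num_heads : Int) (tp_size : Int) (out : List Int) : Prop := out = build_tp_chunk_list_alt num_heads tp_size
instance (num_heads : Int) (tp_size : Int) (out : List Int) : Decidable (Spec_build_tp_chunk_list num_heads tp_size out) := by unfold Spec_build_tp_chunk_list; infer_instance

-- ===== CLAIM =====
def Claim_equal_build_tp_chunk_list : Prop := ∀ (num_heads : Int) (tp_size : Int), Dom_build_tp_chunk_list num_heads tp_size → Pre_build_tp_chunk_list num_heads tp_size → Spec_build_tp_chunk_list num_heads tp_size (build_tp_chunk_list num_heads tp_size)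

-- ===== LEMMAS AND PROOFS =====

-- The greedy loop on remaining = b*(t+1)+m (0 ≤ m ≤ t) yields m copies of b+1 then the rest b.
theorem build_tp_chunk_list_go_eq (t : Nat) : ∀ (b m : Int), 0 ≤ m → m ≤ (t : Int) →
    build_tp_chunk_list_go (b * ((t : Int) + 1) + m) (t + 1)
      = List.replicate m.toNat (b + 1) ++ List.replicate (t + 1 - m.toNat) b := by
  induction t with
  | zero =>
      intro b m h0 h1
      have hm : m = 0 := le_antisymm h1 h0
      subst hm
      simp [build_tp_chunk_list_go]
  | succ t ih =>
      intro b m h0 h1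
      by_cases hm0 : m = 0
      · subst hm0
        have hc : -(PySem.Int.floordiv (-(b * (((t:Int) + 1) + 1) + 0)) (((t:Int) + 1) + 1)) = b := by
          rw [PySem.Int.neg_floordiv_neg_eq_iff_of_pos (by omega)]
          constructor <;> nlinarith [Int.natCast_nonneg t]
        show (let slots : Int := ((t:Nat)+1 : Nat) + 1;
              let c := -(PySem.Int.floordiv (-(b * (((t:Int) + 1) + 1) + 0)) slots);
              c :: build_tp_chunk_list_go (b * (((t:Int) + 1) + 1) + 0 - c) (t+1)) = _
        simp only [Nat.cast_add, Nat.cast_one, hc]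
        have harg : b * (((t:Int) + 1) + 1) + 0 - b = b * ((t:Int) + 1) + 0 := by ring
        rw [harg, ih b 0 le_rfl (Int.natCast_nonneg t)]
        simp [List.replicate_succ]
      · have hm1 : 1 ≤ m := by omega
        have h1' : m ≤ (t : Int) + 1 := by exact_mod_cast h1
        have hc : -(PySem.Int.floordiv (-(b * (((t:Int) + 1) + 1) + m)) (((t:Int) + 1) + 1)) = b + 1 := by
          rw [PySem.Int.neg_floordiv_neg_eq_iff_of_pos (by omega)]
          constructor <;> nlinarith [h1', hm1]
        show (let slots : Int := ((t:Nat)+1 : Nat) + 1;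
              let c := -(PySem.Int.floordiv (-(b * (((t:Int) + 1) + 1) + m)) slots);
              c :: build_tp_chunk_list_go (b * (((t:Int) + 1) + 1) + m - c) (t+1)) = _
        simp only [Nat.cast_add, Nat.cast_one, hc]
        have harg : b * (((t:Int) + 1) + 1) + m - (b + 1) = b * ((t:Int) + 1) + (m - 1) := by ring
        rw [harg, ih b (m - 1) (by omega) (by omega)]
        have hmt : m.toNat = (m - 1).toNat + 1 := by omega
        have hlen : t + 1 - (m - 1).toNat = t + 2 - m.toNat := by omega
        rw [hmt, List.replicate_succ, hlen]
        simp
        omega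

-- A's comprehension equals the two-block normal form.
theorem build_tp_chunk_list_blocks (num_heads tp_size : Int) (ht : 0 < tp_size) :
    build_tp_chunk_list num_heads tp_size
      = List.replicate (PySem.Int.mod num_heads tp_size).toNat (PySem.Int.floordiv num_heads tp_size + 1)
        ++ List.replicate (tp_size - PySem.Int.mod num_heads tp_size).toNat (PySem.Int.floordiv num_heads tp_size) := by
  unfold build_tp_chunk_list
  set base := PySem.Int.floordiv num_heads tp_size with hb
  set rem := PySem.Int.mod num_heads tp_size with hr
  have hrem0 : 0 ≤ rem := by
    rw [hr, PySem.Int.mod_eq_emod_of_pos ht]; exact Int.emod_nonneg _ (by omega)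
  have hremlt : rem < tp_size := by
    rw [hr, PySem.Int.mod_eq_emod_of_pos ht]; exact Int.emod_lt_of_pos _ ht
  rw [PySem.List.pyRange_one_append 0 rem tp_size hrem0 (le_of_lt hremlt), List.map_append]
  congr 1
  · rw [List.map_congr_left (g := fun _ => base + 1)
      (fun x hx => by
        have := (PySem.List.mem_pyRange_one).1 hx
        simp [if_pos this.2])]
    rw [List.map_const', PySem.List.length_pyRange_one]
    simp
  · rw [List.map_congr_left (g := fun _ => base)
      (fun x hx => by
        have := (PySem.List.mem_pyRange_one).1 hx
        simp [if_neg (not_lt.2 this.1)])]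
    rw [List.map_const', PySem.List.length_pyRange_one]

-- ===== VERDICT =====
theorem build_tp_chunk_list_spec : Claim_equal_build_tp_chunk_list := by
  intro num_heads tp_size _ hpre
  obtain ⟨hn, ht⟩ := hpre
  unfold Spec_build_tp_chunk_list
  rw [build_tp_chunk_list_blocks num_heads tp_size ht]
  unfold build_tp_chunk_list_alt
  set base := PySem.Int.floordiv num_heads tp_size with hb
  set rem := PySem.Int.mod num_heads tp_size with hr
  have hrem0 : 0 ≤ rem := by
    rw [hr, PySem.Int.mod_eq_emod_of_pos ht]; exact Int.emod_nonneg _ (by omega)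
  have hremlt : rem < tp_size := by
    rw [hr, PySem.Int.mod_eq_emod_of_pos ht]; exact Int.emod_lt_of_pos _ ht
  have hdm : base * tp_size + rem = num_heads := by
    rw [hb, hr]; exact PySem.Int.floordiv_mul_add_mod num_heads tp_size
  obtain ⟨t, hts⟩ : ∃ t : Nat, tp_size.toNat = t + 1 := ⟨tp_size.toNat - 1, by omega⟩
  have htsz : tp_size = (t : Int) + 1 := by omega
  have hnum : num_heads = base * ((t : Int) + 1) + rem := by rw [← htsz]; omega
  rw [hts, hnum, build_tp_chunk_list_go_eq t base rem hrem0 (by omega)]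
  congr 2
  omega
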